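-- pv_equiv track=rewrite | github.com/JonasWard/advent_of_code_2021 | day_8.py | gen_overlap_with_uniques_dict
-- ===== SOURCE A (Python) =====
-- def overlap_function(string_list_a, string_list_b):
--     cnt = 0
--     for v_a in string_list_a:
--         if v_a in string_list_b:
--             cnt += 1
--
--     return cnt
--
-- def gen_overlap_with_uniques_dict(state_dict):
--     overlap_with_uniques_dict = {}
--
--     for state, values in state_dict.items():
--         loc_dict = {}
--         for state_again, values_again in state_dict.items():
--             if not(state_again == state):
--                 loc_dict[state_again] = overlap_function(values, values_again)
--         overlap_with_uniques_dict[state] = loc_dict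
--
--     return overlap_with_uniques_dict
-- ===== SOURCE B (Python) =====
-- def _count_table(values):
--     # value -> multiplicity, keys in first-occurrence order
--     table = {}
--     for v in values:
--         table[v] = table.get(v, 0) + 1
--     return table
--
-- def gen_overlap_with_uniques_dict(state_dict):
--     # inverted index: value -> set of states whose list contains it
--     index = {}
--     for state, values in state_dict.items():
--         for v in values:
--             index.setdefault(v, set()).add(state)
--     base = dict.fromkeys(state_dict, 0)
--     result = {}
--     for state, values in state_dict.items():
--         row = dict(base)
--         del row[state]
--         # fan out each of this state's distinct values to the states sharing it
--         for v, c in _count_table(values).items():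
--             for other in index[v]:
--                 if other != state:
--                     row[other] += c
--         result[state] = row
--     return result
-- ===== Notes on version B (the rewrite author's own statement) =====
-- stated objective: faster
-- what changed: Instead of rescanning each state's list against every other state's list pair by pair, B builds an inverted index (value -> set of states containing it) and per-state multiplicity tables in one pass, pre-fills zero rows from a shared template, and fans each state's distinct-value multiplicities out only to the states sharing that value.
import Mathlib
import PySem

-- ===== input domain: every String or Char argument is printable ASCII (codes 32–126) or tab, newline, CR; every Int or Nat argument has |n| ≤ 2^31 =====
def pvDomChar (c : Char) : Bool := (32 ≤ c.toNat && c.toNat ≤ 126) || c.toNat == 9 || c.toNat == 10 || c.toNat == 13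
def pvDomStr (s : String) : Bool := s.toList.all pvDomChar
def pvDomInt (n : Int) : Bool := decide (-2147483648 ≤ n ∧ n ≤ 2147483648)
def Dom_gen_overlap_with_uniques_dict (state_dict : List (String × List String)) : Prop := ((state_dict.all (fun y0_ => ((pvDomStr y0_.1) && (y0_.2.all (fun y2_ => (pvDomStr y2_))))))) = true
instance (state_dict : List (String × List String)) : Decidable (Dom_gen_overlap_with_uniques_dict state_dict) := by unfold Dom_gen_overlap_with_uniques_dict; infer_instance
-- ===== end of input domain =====

-- B replaces A's per-pair list scans by an inverted index (value -> states
-- sharing it) and per-state count tables, filling zero rows first and fanning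
-- each distinct value's multiplicity out to the states that share it
-- (objective: faster; a timing run measured it).

-- ===== PORT A =====
def overlapFunction (string_list_a string_list_b : List String) : Int :=
  string_list_a.foldl (fun cnt v_a => if string_list_b.contains v_a then cnt + 1 else cnt) 0

def gen_overlap_with_uniques_dict (state_dict : List (String × List String)) : List (String × List (String × Int)) :=
  state_dict.foldl (fun overlap_with_uniques_dict p =>
    let loc_dict := state_dict.foldl (fun loc_dict q =>
      if !(q.1 == p.1) then loc_dict ++ [(q.1, overlapFunction p.2 q.2)] else loc_dict) []
    overlap_with_uniques_dict ++ [(p.1, loc_dict)]) []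

-- ===== PORT B =====
-- _count_table of Source B
def pvCountTable (values : List String) : PySem.Dict String Int :=
  values.foldl (fun table v => table.insert v (table.getD v 0 + 1)) PySem.Dict.empty

-- the index-building loop of Source B: value -> set of states containing it
def pvBuildIndex (state_dict : List (String × List String)) : PySem.Dict String (PySem.Set String) :=
  state_dict.foldl (fun index p =>
    p.2.foldl (fun index v => index.modify v [] (fun st => st.add p.1)) index)
    PySem.Dict.empty

-- one result row of Source B: row = dict(base); del row[state]; then the fan-out.
-- Python's `row[other] += c` would raise KeyError for a missing key; under
-- Pre_ `other` is always a key of row, so `modify` with default 0 is exact.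
def pvRow (index : PySem.Dict String (PySem.Set String)) (base : PySem.Dict String Int)
    (p : String × List String) : PySem.Dict String Int :=
  (pvCountTable p.2).items.foldl (fun row vc =>
      (index.getD vc.1 []).foldl (fun row other =>
        if !(other == p.1) then row.modify other 0 (· + vc.2) else row) row)
    (base.erase p.1)

def gen_overlap_with_uniques_dict_alt (state_dict : List (String × List String)) : List (String × List (String × Int)) :=
  let index := pvBuildIndex state_dict
  let base := PySem.Dict.ofList (state_dict.map (fun p => (p.1, (0 : Int))))  -- dict.fromkeys(state_dict, 0)
  let result := state_dict.foldl (fun result p => result.insert p.1 (pvRow index base p)) PySem.Dict.empty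
  result.items.map (fun pr => (pr.1, pr.2.items))

-- ===== PRECONDITION & SPEC =====
-- Pre_ only states that the association list denotes a Python dict: a dict
-- cannot hold the same key twice, so lists repeating a key never arise as A's
-- dict parameter (this excludes no input a caller of A can supply).
def Pre_gen_overlap_with_uniques_dict (state_dict : List (String × List String)) : Prop :=
  (state_dict.map Prod.fst).Nodup
instance (state_dict : List (String × List String)) : Decidable (Pre_gen_overlap_with_uniques_dict state_dict) := by unfold Pre_gen_overlap_with_uniques_dict; infer_instance

def pvWitness_gen_overlap_with_uniques_dict : (List (String × List String)) :=
  [("ca", ["a", "b", "a"]), ("nv", ["b", "c"]), ("ut", [])]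

def Spec_gen_overlap_with_uniques_dict (state_dict : List (String × List String)) (out : List (String × List (String × Int))) : Prop := out = gen_overlap_with_uniques_dict_alt state_dict
instance (state_dict : List (String × List String)) (out : List (String × List (String × Int))) : Decidable (Spec_gen_overlap_with_uniques_dict state_dict out) := by unfold Spec_gen_overlap_with_uniques_dict; infer_instance

-- ===== CLAIM (what is proved, stated in full; the proofs are below) =====
def Claim_equal_gen_overlap_with_uniques_dict : Prop := ∀ (state_dict : List (String × List String)), Dom_gen_overlap_with_uniques_dict state_dict → Pre_gen_overlap_with_uniques_dict state_dict → Spec_gen_overlap_with_uniques_dict state_dict (gen_overlap_with_uniques_dict state_dict)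

-- ===== LEMMAS AND PROOFS =====

-- keys of a Python dict are unique, so a key determines its entry
lemma pv_key_eq {sd : List (String × List String)} (hk : (sd.map Prod.fst).Nodup)
    {p q : String × List String} (hp : p ∈ sd) (hq : q ∈ sd) (h : p.1 = q.1) : p = q :=
  List.inj_on_of_nodup_map hk hp hq h

-- one state's pass over its value list, seen through getD
lemma pv_getD_indexInner (s : String) (vs : List String) (v : String) :
    ∀ idx : PySem.Dict String (PySem.Set String),
      ((vs.foldl (fun idx w => idx.modify w [] (fun st => st.add s)) idx).getD v []) =
        if v ∈ vs then (idx.getD v []).add s else idx.getD v [] := by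
  induction vs with
  | nil => simp
  | cons x vs ih =>
    intro idx
    simp only [List.foldl_cons]
    rw [ih]
    rw [PySem.Dict.getD_modify]
    by_cases hvx : v = x
    · subst hvx
      by_cases hv : v ∈ vs
      · simp [hv]
      · simp [hv]
    · by_cases hv : v ∈ vs <;> simp [hv, hvx]

-- the whole index: the states listed at value v are exactly those whose list contains v
lemma pv_getD_index {sd : List (String × List String)} (hk : (sd.map Prod.fst).Nodup) (v : String) :
    (pvBuildIndex sd).getD v [] = (sd.filter (fun p => decide (v ∈ p.2))).map Prod.fst := by
  have main : ∀ (sd : List (String × List String)) (idx : PySem.Dict String (PySem.Set String)),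
      (sd.map Prod.fst).Nodup → (∀ p ∈ sd, ∀ w : String, p.1 ∉ idx.getD w ([] : PySem.Set String)) →
      ((sd.foldl (fun index p =>
          p.2.foldl (fun index w => index.modify w [] (fun st => st.add p.1)) index) idx).getD v []) =
        idx.getD v [] ++ (sd.filter (fun p => decide (v ∈ p.2))).map Prod.fst := by
    intro sd
    induction sd with
    | nil => simp
    | cons p sd ih =>
      intro idx hk hfresh
      simp only [List.map_cons, List.nodup_cons] at hk
      simp only [List.foldl_cons]
      have h1 := pv_getD_indexInner p.1 p.2
      have hfresh' : ∀ q ∈ sd, ∀ w : String,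
          q.1 ∉ (p.2.foldl (fun idx w => idx.modify w [] (fun st => st.add p.1)) idx).getD w ([] : PySem.Set String) := by
        intro q hq w
        rw [h1 w idx]
        have hq1 : q.1 ∉ idx.getD w ([] : PySem.Set String) := hfresh q (List.mem_cons_of_mem p hq) w
        have hqp : q.1 ≠ p.1 := by
          intro h
          exact hk.1 (h ▸ List.mem_map_of_mem hq)
        split
        · rw [PySem.Set.mem_add]
          rintro (h | h)
          · exact hq1 h
          · exact hqp h
        · exact hq1
      rw [ih _ hk.2 hfresh', h1 v idx]
      by_cases hv : v ∈ p.2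
      · rw [if_pos hv, PySem.Set.add_of_not_mem (hfresh p List.mem_cons_self v)]
        simp [hv]
      · simp [hv]
  have := main sd PySem.Dict.empty hk (by simp [PySem.Dict.getD_empty])
  unfold pvBuildIndex
  simpa using this

lemma pv_nodup_index {sd : List (String × List String)} (hk : (sd.map Prod.fst).Nodup) (v : String) :
    ((pvBuildIndex sd).getD v ([] : PySem.Set String)).Nodup := by
  rw [pv_getD_index hk]
  exact hk.sublist (List.Sublist.map Prod.fst List.filter_sublist)

lemma pv_mem_index {sd : List (String × List String)} (hk : (sd.map Prod.fst).Nodup)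
    {q : String × List String} (hq : q ∈ sd) (v : String) :
    q.1 ∈ (pvBuildIndex sd).getD v ([] : PySem.Set String) ↔ v ∈ q.2 := by
  rw [pv_getD_index hk]
  simp only [List.mem_map, List.mem_filter, decide_eq_true_eq]
  constructor
  · rintro ⟨p, ⟨hp, hv⟩, heq⟩
    rw [pv_key_eq hk hp hq heq] at hv
    exact hv
  · intro hv
    exact ⟨q, ⟨hq, hv⟩, rfl⟩

-- fan-out of one value over its state set: effect on one slot
lemma pv_getD_rowInner (a : String) (c : Int) (st : List String) (hst : st.Nodup)
    (b : String) (hba : b ≠ a) :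
    ∀ row : PySem.Dict String Int,
      ((st.foldl (fun row x => if !(x == a) then row.modify x 0 (· + c) else row) row).getD b 0) =
        row.getD b 0 + (if b ∈ st then c else 0) := by
  induction st with
  | nil => simp
  | cons x st ih =>
    intro row
    simp only [List.nodup_cons] at hst
    simp only [List.foldl_cons]
    by_cases hxa : x = a
    · rw [if_neg (by simp [hxa]), ih hst.2]
      have : b ∈ x :: st ↔ b ∈ st := by
        subst hxa; simp [List.mem_cons, hba]
      rw [if_congr this rfl rfl]
    · rw [if_pos (by simp [hxa]), ih hst.2]
      rw [PySem.Dict.getD_modify]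
      by_cases hbx : b = x
      · subst hbx
        rw [if_pos rfl, if_neg hst.1, if_pos List.mem_cons_self]
        ring
      · rw [if_neg hbx]
        have : b ∈ x :: st ↔ b ∈ st := by simp [List.mem_cons, hbx]
        rw [if_congr this rfl rfl]

-- fan-out of a list of (value, multiplicity) pairs: effect on one slot
lemma pv_getD_rowOuter {sd : List (String × List String)} (hk : (sd.map Prod.fst).Nodup)
    (a b : String) (hba : b ≠ a) :
    ∀ (its : List (String × Int)) (row : PySem.Dict String Int),
      ((its.foldl (fun row vc =>
          ((pvBuildIndex sd).getD vc.1 []).foldl (fun row x =>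
            if !(x == a) then row.modify x 0 (· + vc.2) else row) row) row).getD b 0) =
        row.getD b 0 + (its.map (fun vc => if b ∈ (pvBuildIndex sd).getD vc.1 ([] : PySem.Set String) then vc.2 else 0)).sum := by
  intro its
  induction its with
  | nil => simp
  | cons vc its ih =>
    intro row
    simp only [List.foldl_cons, List.map_cons, List.sum_cons]
    rw [ih, pv_getD_rowInner a vc.2 _ (pv_nodup_index hk vc.1) b hba]
    ring

-- the fan-out loops never create a key
lemma pv_keys_rowInner (a : String) (c : Int) :
    ∀ (st : List String) (row : PySem.Dict String Int), (∀ x ∈ st, x ≠ a → x ∈ row.keys) →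
      ((st.foldl (fun row x => if !(x == a) then row.modify x 0 (· + c) else row) row).keys) = row.keys := by
  intro st
  induction st with
  | nil => simp
  | cons x st ih =>
    intro row hmem
    simp only [List.foldl_cons]
    by_cases hxa : x = a
    · rw [if_neg (by simp [hxa])]
      exact ih row (fun y hy => hmem y (List.mem_cons_of_mem x hy))
    · rw [if_pos (by simp [hxa])]
      have hx : x ∈ row.keys := hmem x List.mem_cons_self hxa
      have hkeys : (row.modify x 0 (· + c)).keys = row.keys := by
        rw [PySem.Dict.keys_modify, PySem.Dict.keys_insert_of_contains]
        exact (PySem.Dict.contains_iff_mem_keys row x).mpr hx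
      rw [ih _ (fun y hy hya => by rw [hkeys]; exact hmem y (List.mem_cons_of_mem x hy) hya), hkeys]

lemma pv_keys_rowOuter {sd : List (String × List String)} (a : String) :
    ∀ (its : List (String × Int)) (row : PySem.Dict String Int),
      (∀ vc ∈ its, ∀ x ∈ (pvBuildIndex sd).getD vc.1 ([] : PySem.Set String), x ≠ a → x ∈ row.keys) →
      ((its.foldl (fun row vc =>
          ((pvBuildIndex sd).getD vc.1 []).foldl (fun row x =>
            if !(x == a) then row.modify x 0 (· + vc.2) else row) row) row).keys) = row.keys := by
  intro its
  induction its with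
  | nil => simp
  | cons vc its ih =>
    intro row hmem
    simp only [List.foldl_cons]
    have h1 : ((((pvBuildIndex sd).getD vc.1 []).foldl (fun row x =>
        if !(x == a) then row.modify x 0 (· + vc.2) else row) row)).keys = row.keys :=
      pv_keys_rowInner a vc.2 _ row (fun x hx hxa => hmem vc List.mem_cons_self x hx hxa)
    rw [ih _ (fun wc hwc x hx hxa => by rw [h1]; exact hmem wc (List.mem_cons_of_mem vc hwc) x hx hxa), h1]

-- dict.fromkeys(state_dict, 0) as an items list
lemma pv_items_base {sd : List (String × List String)} (hk : (sd.map Prod.fst).Nodup) :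
    (PySem.Dict.ofList (sd.map (fun p => (p.1, (0 : Int))))).items = sd.map (fun p => (p.1, (0 : Int))) := by
  have h := PySem.Dict.items_foldl_insert_fresh (sd.map (fun p => (p.1, (0 : Int))))
    Prod.fst Prod.snd PySem.Dict.empty (by simp) (by simpa [List.map_map] using hk)
  simp only [PySem.Dict.ofList, PySem.Dict.update]
  simpa using h

-- a 0/1-weighted sum over the distinct values of the source = the membership count
lemma pv_indicator_sum (bL : List String) (x : String) (c : Int) :
    ∀ L : List String, L.Nodup → x ∈ L →
      (L.map (fun v => if v ∈ bL then (if v = x then c else 0) else 0)).sum = if x ∈ bL then c else 0 := by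
  have zero_of_not_mem : ∀ L : List String, x ∉ L →
      (L.map (fun v => if v ∈ bL then (if v = x then c else 0) else 0)).sum = 0 := by
    intro L
    induction L with
    | nil => simp
    | cons y L ih =>
      intro hx
      simp only [List.mem_cons, not_or] at hx
      simp [Ne.symm hx.1, ih hx.2]
  intro L
  induction L with
  | nil => simp
  | cons y L ih =>
    intro hnd hx
    simp only [List.nodup_cons] at hnd
    rcases List.mem_cons.mp hx with h | h
    · subst h
      simp [zero_of_not_mem L hnd.1]
    · have hxy : x ≠ y := fun he => hnd.1 (he ▸ h)
      simp only [List.map_cons, List.sum_cons]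
      rw [ih hnd.2 h]
      have hzero : (if y ∈ bL then (if y = x then c else 0) else 0) = 0 := by
        by_cases hy : y ∈ bL <;> simp [hy, Ne.symm hxy]
      rw [hzero, zero_add]

lemma pv_sum_dedup (bL : List String) (L : List String) (hL : L.Nodup) :
    ∀ aL : List String, (∀ v ∈ aL, v ∈ L) →
      (L.map (fun v => if v ∈ bL then (aL.count v : Int) else 0)).sum = (aL.countP bL.contains : Int) := by
  intro aL
  induction aL with
  | nil => simp
  | cons w aL ih =>
    intro hsub
    have hw : w ∈ L := hsub w List.mem_cons_self
    have hsub' : ∀ v ∈ aL, v ∈ L := fun v hv => hsub v (List.mem_cons_of_mem w hv)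
    have hterm : ∀ v : String,
        (if v ∈ bL then (((w :: aL).count v : Nat) : Int) else 0) =
          (if v ∈ bL then (aL.count v : Int) else 0) + (if v ∈ bL then (if v = w then (1:Int) else 0) else 0) := by
      intro v
      rw [List.count_cons]
      by_cases hv : v ∈ bL
      · by_cases hvw : v = w
        · subst hvw; simp [hv]
        · simp [hv, hvw, Ne.symm hvw]
      · simp [hv]
    simp only [hterm]
    rw [PySem.List.sum_map_add_int, ih hsub', pv_indicator_sum bL w 1 L hL hw]
    rw [List.countP_cons]
    push_cast
    by_cases hwb : w ∈ bL
    · simp [hwb]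
    · simp [hwb]

lemma pv_overlap_countP (aL bL : List String) :
    overlapFunction aL bL = (aL.countP bL.contains : Int) := by
  unfold overlapFunction
  rw [PySem.List.foldl_count_if]
  simp

-- ===== VERDICT (by name: the statement is the Claim_ definition above) =====
theorem gen_overlap_with_uniques_dict_spec : Claim_equal_gen_overlap_with_uniques_dict := by
  intro sd _ hk
  unfold Pre_gen_overlap_with_uniques_dict at hk
  unfold Spec_gen_overlap_with_uniques_dict gen_overlap_with_uniques_dict gen_overlap_with_uniques_dict_alt
  dsimp only
  rw [PySem.List.foldl_append_singleton_eq_map, List.nil_append]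
  rw [PySem.Dict.items_foldl_insert_fresh sd (fun p => p.1)
    (fun p => pvRow (pvBuildIndex sd) (PySem.Dict.ofList (sd.map (fun p => (p.1, (0 : Int))))) p)
    PySem.Dict.empty (by simp) (by simpa using hk)]
  simp only [PySem.Dict.empty, List.nil_append, List.map_map]
  apply List.map_congr_left
  intro p hp
  rw [PySem.List.foldl_append_if]
  simp only [Function.comp_apply, List.nil_append]
  refine congrArg (fun z => (p.1, z)) ?_
  -- the fan-out row, as an items list
  have hbase : (PySem.Dict.ofList (sd.map (fun p => (p.1, (0 : Int))))).items
      = sd.map (fun p => (p.1, (0 : Int))) := pv_items_base hk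
  have hrow0items : ((PySem.Dict.ofList (sd.map (fun p => (p.1, (0 : Int))))).erase p.1).items
      = (sd.filter (fun q => !(q.1 == p.1))).map (fun q => (q.1, (0 : Int))) := by
    simp only [PySem.Dict.erase, hbase, List.filter_map]
    rfl
  have hrow0keys : ((PySem.Dict.ofList (sd.map (fun p => (p.1, (0 : Int))))).erase p.1).keys
      = (sd.filter (fun q => !(q.1 == p.1))).map Prod.fst := by
    simp only [PySem.Dict.keys, hrow0items, List.map_map]
    rfl
  have hnkeys0 : ((PySem.Dict.ofList (sd.map (fun p => (p.1, (0 : Int))))).erase p.1).keys.Nodup := by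
    rw [hrow0keys]
    exact hk.sublist (List.Sublist.map Prod.fst List.filter_sublist)
  have hcond : ∀ vc ∈ (pvCountTable p.2).items, ∀ x ∈ (pvBuildIndex sd).getD vc.1 ([] : PySem.Set String),
      x ≠ p.1 → x ∈ ((PySem.Dict.ofList (sd.map (fun p => (p.1, (0 : Int))))).erase p.1).keys := by
    intro vc _ x hx hxa
    rw [hrow0keys]
    rw [pv_getD_index hk vc.1] at hx
    rcases List.mem_map.mp hx with ⟨r, hr, hr1⟩
    rcases List.mem_filter.mp hr with ⟨hrsd, _⟩
    refine List.mem_map.mpr ⟨r, List.mem_filter.mpr ⟨hrsd, ?_⟩, hr1⟩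
    simpa [hr1] using hxa
  have hkeysfin : (pvRow (pvBuildIndex sd) (PySem.Dict.ofList (sd.map (fun p => (p.1, (0 : Int))))) p).keys
      = ((PySem.Dict.ofList (sd.map (fun p => (p.1, (0 : Int))))).erase p.1).keys := by
    unfold pvRow
    exact pv_keys_rowOuter p.1 _ _ hcond
  rw [PySem.Dict.items_eq_map_keys _ (by rw [hkeysfin]; exact hnkeys0) 0, hkeysfin, hrow0keys, List.map_map]
  apply List.map_congr_left
  intro q hq
  rcases List.mem_filter.mp hq with ⟨hqsd, hqpb⟩
  have hqp : q.1 ≠ p.1 := by simpa using hqpb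
  refine congrArg (fun z => (q.1, z)) ?_
  -- value of slot q.1 in the fan-out row
  have hrow0val : ((PySem.Dict.ofList (sd.map (fun p => (p.1, (0 : Int))))).erase p.1).getD q.1 0 = 0 := by
    refine PySem.Dict.getD_of_mem_items _ ?_ hnkeys0 0
    rw [hrow0items]
    exact List.mem_map.mpr ⟨q, hq, rfl⟩
  have hgd : (pvRow (pvBuildIndex sd) (PySem.Dict.ofList (sd.map (fun p => (p.1, (0 : Int))))) p).getD q.1 0
      = ((pvCountTable p.2).items.map (fun vc =>
          if q.1 ∈ (pvBuildIndex sd).getD vc.1 ([] : PySem.Set String) then vc.2 else 0)).sum := by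
    unfold pvRow
    rw [pv_getD_rowOuter hk p.1 q.1 hqp, hrow0val, zero_add]
  rw [hgd]
  have hct : (pvCountTable p.2).items
      = (PySem.Set.ofList p.2).map (fun v => (v, (p.2.count v : Int))) := by
    unfold pvCountTable
    rw [PySem.Dict.foldl_insert_getD_add_one_eq_counter, PySem.Dict.items_counter]
  rw [hct, List.map_map]
  have hpt : ∀ v ∈ PySem.Set.ofList p.2,
      ((fun vc => if q.1 ∈ (pvBuildIndex sd).getD vc.1 ([] : PySem.Set String) then vc.2 else 0) ∘
        (fun v => (v, (p.2.count v : Int)))) v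
      = (if v ∈ q.2 then (p.2.count v : Int) else 0) := by
    intro v _
    simp only [Function.comp_apply]
    rw [if_congr (pv_mem_index hk hqsd v) rfl rfl]
  rw [List.map_congr_left hpt,
    pv_sum_dedup q.2 (PySem.Set.ofList p.2) (PySem.Set.nodup_ofList p.2) p.2
      (fun v hv => (PySem.Set.mem_ofList p.2 v).mpr hv),
    pv_overlap_countP]
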